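-- pv_equiv track=rewrite | github.com/michellab/BioSimSpace | python/BioSimSpace/_Config/_amber.py | _create_restraint_mask
-- ===== SOURCE A (Python) =====
-- def _create_restraint_mask(atom_idxs):
--     """
--     Internal helper function to create an AMBER restraint mask from a
--     list of atom indices.
--
--     Parameters
--     ----------
--
--     atom_idxs : [int]
--         A list of atom indices.
--
--     Returns
--     -------
--
--     restraint_mask : str
--         The AMBER restraint mask.
--     """
--
--     if not isinstance(atom_idxs, (list, tuple)):
--         raise TypeError("'atom_idxs' must be a list of 'int' types.")
--
--     if not all(type(x) is int for x in atom_idxs):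
--         raise TypeError("'atom_idxs' must be a list of 'int' types.")
--
--     # AMBER has a restriction on the number of characters in the restraint
--     # mask (not documented) so we can't just use comma-separated atom
--     # indices. Instead we loop through the indices and use hyphens to
--     # separate contiguous blocks of indices, e.g. 1-23,34-47,...
--
--     # Create a set to sort and ensure no duplicates, then convert back to a list.
--     # This should already by done, but do so again in case the user is accessing
--     # the method directly.
--     atom_idxs = list(set(atom_idxs))
--     atom_idxs.sort()
--
--     # Handle single atom restraints differently.
--     if len(atom_idxs) == 1:
--         restraint_mask = f"@{atom_idxs[0]+1}"
--
--     else: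
--         # Start the mask with the first atom index. (AMBER is 1 indexed.)
--         restraint_mask = f"@{atom_idxs[0]+1}"
--
--         # Store the current index.
--         prev_idx = atom_idxs[0]
--
--         # Store the lead index for this block.
--         lead_idx = prev_idx
--
--         # Loop over all other indices.
--         for idx in atom_idxs[1:]:
--             # There is a gap in the indices.
--             if idx - prev_idx > 1:
--                 if prev_idx != lead_idx:
--                     restraint_mask += f"{prev_idx+1},{idx+1}"
--                 else:
--                     restraint_mask += f",{idx+1}"
--                 lead_idx = idx
--             else:
--                 # This is the first index beyond the lead.
--                 if idx - lead_idx == 1: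
--                     restraint_mask += "-"
--             # Set the value of the previous index.
--             prev_idx = idx
--
--         # Add the final atom to the mask.
--         if idx - atom_idxs[-2] == 1:
--             restraint_mask += f"{idx+1}"
--         else:
--             if idx != lead_idx:
--                 restraint_mask += f",{idx+1}"
--
--     return restraint_mask
-- ===== SOURCE B (Python) =====
-- def _create_restraint_mask(atom_idxs):
--     if not isinstance(atom_idxs, (list, tuple)):
--         raise TypeError("'atom_idxs' must be a list of 'int' types.")
--
--     if not all(type(x) is int for x in atom_idxs):
--         raise TypeError("'atom_idxs' must be a list of 'int' types.")
--
--     # Sort and de-duplicate, as the original does.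
--     idxs = sorted(set(atom_idxs))
--
--     # Seed the first run from the first index (raises IndexError on an
--     # empty list, like the original) and group the rest into runs of
--     # consecutive values.
--     first = idxs[0]
--     runs = [[first, first]]
--     for i in idxs[1:]:
--         if i == runs[-1][1] + 1:
--             runs[-1][1] = i
--         else:
--             runs.append([i, i])
--
--     # Render each run (AMBER is 1-indexed), join with commas.
--     parts = [str(a + 1) if a == b else f"{a + 1}-{b + 1}" for a, b in runs]
--     return "@" + ",".join(parts)
-- ===== Notes on version B (the rewrite author's own statement) =====
-- stated objective: simpler
-- what changed: Replaces A's single stateful scan (mask string built in-flight with prev/lead indices and a post-loop fix-up that inspects the second-to-last element) by a two-phase decomposition: group the sorted indices into consecutive runs, then format each run and comma-join; like A, B raises IndexError on the empty list (idxs[0]).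
import Mathlib
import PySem

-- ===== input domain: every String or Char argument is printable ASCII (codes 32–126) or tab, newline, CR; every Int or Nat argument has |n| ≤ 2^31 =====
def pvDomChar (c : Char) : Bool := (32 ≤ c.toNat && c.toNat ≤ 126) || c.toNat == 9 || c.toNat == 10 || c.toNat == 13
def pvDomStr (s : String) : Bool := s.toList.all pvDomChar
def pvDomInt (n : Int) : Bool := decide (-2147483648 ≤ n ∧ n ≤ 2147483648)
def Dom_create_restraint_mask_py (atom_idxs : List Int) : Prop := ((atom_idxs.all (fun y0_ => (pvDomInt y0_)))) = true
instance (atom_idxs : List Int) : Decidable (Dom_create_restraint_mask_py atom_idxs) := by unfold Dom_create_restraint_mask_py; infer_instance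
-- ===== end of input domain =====

-- B replaces A's stateful scan + post-loop fix-up by grouping the sorted indices into
-- consecutive runs and comma-joining their formatted forms (objective: simpler).

-- ===== PORT A =====
-- loop body of A's `for idx in atom_idxs[1:]` over state (restraint_mask, prev_idx, lead_idx)
def pvAStep (st : String × Int × Int) (idx : Int) : String × Int × Int :=
  if idx - st.2.1 > 1 then
    if st.2.1 ≠ st.2.2 then
      (st.1 ++ PySem.Int.toStr (st.2.1 + 1) ++ "," ++ PySem.Int.toStr (idx + 1), idx, idx)
    else
      (st.1 ++ "," ++ PySem.Int.toStr (idx + 1), idx, idx)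
  else
    if idx - st.2.2 = 1 then (st.1 ++ "-", idx, st.2.2)
    else (st.1, idx, st.2.2)

def create_restraint_mask_py (atom_idxs : List Int) : String :=
  -- atom_idxs = list(set(atom_idxs)); atom_idxs.sort()
  let s := PySem.List.sorted (PySem.Set.ofList atom_idxs) (fun x => x) false
  if s.length = 1 then
    "@" ++ PySem.Int.toStr (((PySem.List.pyGet? s 0).getD 0) + 1)
  else
    match s with
    | [] => ""  -- Python raises IndexError here (atom_idxs[0] on the empty list); excluded by Pre_
    | x :: rest =>
      let st := rest.foldl pvAStep ("@" ++ PySem.Int.toStr (x + 1), x, x)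
      -- final block: idx = st.2.1, lead_idx = st.2.2, atom_idxs[-2] via pyGet? (always in range here)
      if st.2.1 - (PySem.List.pyGet? s (-2)).getD 0 = 1 then
        st.1 ++ PySem.Int.toStr (st.2.1 + 1)
      else
        if st.2.1 ≠ st.2.2 then st.1 ++ "," ++ PySem.Int.toStr (st.2.1 + 1)
        else st.1

-- ===== PORT B =====
-- loop body of B's run-grouping loop (runs[-1][1] update / append)
def pvBStep (runs : List (Int × Int)) (i : Int) : List (Int × Int) :=
  match runs.getLast? with
  | some (a, b) => if i = b + 1 then runs.dropLast ++ [(a, i)] else runs ++ [(i, i)]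
  | none => [(i, i)]

-- str(a+1) if a == b else f"{a+1}-{b+1}"
def pvFmt (q : Int × Int) : String :=
  if q.1 = q.2 then PySem.Int.toStr (q.1 + 1)
  else PySem.Int.toStr (q.1 + 1) ++ "-" ++ PySem.Int.toStr (q.2 + 1)

def create_restraint_mask_py_alt (atom_idxs : List Int) : String :=
  let idxs := PySem.List.sorted (PySem.Set.ofList atom_idxs) (fun x => x) false
  match idxs with
  | [] => ""  -- Python raises IndexError here (idxs[0]); excluded by Pre_
  | first :: rest =>
    let runs := rest.foldl pvBStep [(first, first)]
    "@" ++ PySem.Str.join "," (runs.map pvFmt)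

-- ===== PRECONDITION & SPEC =====
-- Pre_ excludes only the empty list, on which both Pythons raise IndexError.
def Pre_create_restraint_mask_py (atom_idxs : List Int) : Prop := atom_idxs ≠ []
instance (atom_idxs : List Int) : Decidable (Pre_create_restraint_mask_py atom_idxs) := by
  unfold Pre_create_restraint_mask_py; infer_instance

def pvWitness_create_restraint_mask_py : List Int := [0, 1, 5]

def Spec_create_restraint_mask_py (atom_idxs : List Int) (out : String) : Prop :=
  out = create_restraint_mask_py_alt atom_idxs
instance (atom_idxs : List Int) (out : String) : Decidable (Spec_create_restraint_mask_py atom_idxs out) := by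
  unfold Spec_create_restraint_mask_py; infer_instance

-- ===== CLAIM (what is proved, stated in full; the proofs are below) =====
def Claim_equal_create_restraint_mask_py : Prop := ∀ (atom_idxs : List Int), Dom_create_restraint_mask_py atom_idxs → Pre_create_restraint_mask_py atom_idxs → Spec_create_restraint_mask_py atom_idxs (create_restraint_mask_py atom_idxs)

-- ===== LEMMAS AND PROOFS =====

def pvFinishA (st : String × Int × Int) (penult : Int) : String :=
  if st.2.1 - penult = 1 then st.1 ++ PySem.Int.toStr (st.2.1 + 1)
  else if st.2.1 ≠ st.2.2 then st.1 ++ "," ++ PySem.Int.toStr (st.2.1 + 1)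
  else st.1
def pvPenult (p : Int) : List Int → Int
  | [] => p
  | [_] => p
  | x :: y :: r => pvPenult x (y :: r)
def pvRenderTail (prev lead : Int) : List Int → String
  | [] => if prev = lead then "" else PySem.Int.toStr (prev + 1)
  | idx :: r =>
    if idx - prev > 1 then
      (if prev ≠ lead then PySem.Int.toStr (prev + 1) ++ "," ++ PySem.Int.toStr (idx + 1)
       else "," ++ PySem.Int.toStr (idx + 1)) ++ pvRenderTail idx idx r
    else
      (if idx - lead = 1 then "-" else "") ++ pvRenderTail idx lead r

theorem pv_lemA : ∀ (r : List Int) (idx prev lead : Int) (m : String),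
    List.Pairwise (· < ·) (prev :: idx :: r) → lead ≤ prev →
    pvFinishA ((idx :: r).foldl pvAStep (m, prev, lead)) (pvPenult prev (idx :: r))
      = m ++ pvRenderTail prev lead (idx :: r) := by
  intro r
  induction r with
  | nil =>
    intro idx prev lead m hp hl
    have hpi : prev < idx := by
      rcases List.pairwise_cons.mp hp with ⟨h1, _⟩
      exact h1 idx (by simp)
    rw [show ([idx].foldl pvAStep (m, prev, lead) : String × Int × Int)
          = pvAStep (m, prev, lead) idx from rfl,
        show pvPenult prev [idx] = prev from rfl]
    by_cases hgap : idx - prev > 1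
    · have hstep : pvAStep (m, prev, lead) idx =
        ((if prev ≠ lead then m ++ PySem.Int.toStr (prev + 1) ++ "," ++ PySem.Int.toStr (idx + 1)
          else m ++ "," ++ PySem.Int.toStr (idx + 1)), idx, idx) := by
        simp only [pvAStep, if_pos hgap]
        split_ifs <;> rfl
      rw [hstep]
      simp only [pvFinishA, pvRenderTail]
      split_ifs <;> (first | (exfalso; omega) | simp [String.append_assoc])
    · have hidx : idx = prev + 1 := by omega
      have hstep : pvAStep (m, prev, lead) idx =
        ((if idx - lead = 1 then m ++ "-" else m), idx, lead) := by
        simp only [pvAStep, if_neg hgap]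
        split_ifs <;> rfl
      rw [hstep]
      simp only [pvFinishA, pvRenderTail]
      split_ifs <;> (first | (exfalso; omega) | simp [String.append_assoc])
  | cons j r' ih =>
    intro idx prev lead m hp hl
    have hpi : prev < idx := by
      rcases List.pairwise_cons.mp hp with ⟨h1, _⟩
      exact h1 idx (by simp)
    have hp' : List.Pairwise (· < ·) (idx :: j :: r') := (List.pairwise_cons.mp hp).2
    rw [show ((idx :: j :: r').foldl pvAStep (m, prev, lead) : String × Int × Int)
          = (j :: r').foldl pvAStep (pvAStep (m, prev, lead) idx) from rfl,
        show pvPenult prev (idx :: j :: r') = pvPenult idx (j :: r') from rfl]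
    by_cases hgap : idx - prev > 1
    · have hstep : pvAStep (m, prev, lead) idx =
        ((if prev ≠ lead then m ++ PySem.Int.toStr (prev + 1) ++ "," ++ PySem.Int.toStr (idx + 1)
          else m ++ "," ++ PySem.Int.toStr (idx + 1)), idx, idx) := by
        simp only [pvAStep, if_pos hgap]
        split_ifs <;> rfl
      rw [hstep, ih j idx idx _ hp' (le_refl idx)]
      simp only [pvRenderTail, if_pos hgap]
      split_ifs <;> simp [String.append_assoc]
    · have hstep : pvAStep (m, prev, lead) idx =
        ((if idx - lead = 1 then m ++ "-" else m), idx, lead) := by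
        simp only [pvAStep, if_neg hgap]
        split_ifs <;> rfl
      rw [hstep, ih j idx lead _ hp' (by omega)]
      simp only [pvRenderTail, if_neg hgap]
      split_ifs <;> simp [String.append_assoc]

def pvRunsTail (a p : Int) : List Int → List (Int × Int)
  | [] => [(a, p)]
  | i :: r => if i = p + 1 then pvRunsTail a i r else (a, p) :: pvRunsTail i i r
def pvTailRender : List (Int × Int) → String
  | [] => ""
  | q :: rs => "," ++ pvFmt q ++ pvTailRender rs

theorem pv_headRuns : ∀ (r : List Int) (a p : Int),
    ∃ b rs, pvRunsTail a p r = (a, b) :: rs ∧ p ≤ b := by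
  intro r
  induction r with
  | nil => intro a p; exact ⟨p, [], rfl, le_refl p⟩
  | cons i r' ih =>
    intro a p
    by_cases h : i = p + 1
    · subst h
      obtain ⟨b, rs, h1, h2⟩ := ih a (p + 1)
      exact ⟨b, rs, by simp [pvRunsTail, h1], by omega⟩
    · exact ⟨p, pvRunsTail i i r', by simp [pvRunsTail, h], le_refl p⟩

theorem pv_lemR : ∀ (r : List Int) (prev lead b : Int) (rs : List (Int × Int)),
    List.Pairwise (· < ·) (prev :: r) → lead ≤ prev →
    pvRunsTail lead prev r = (lead, b) :: rs →
    pvRenderTail prev lead r =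
      (if lead = prev then (if b = lead then "" else "-" ++ PySem.Int.toStr (b + 1))
       else PySem.Int.toStr (b + 1)) ++ pvTailRender rs := by
  intro r
  induction r with
  | nil =>
    intro prev lead b rs hp hl hrt
    simp only [pvRunsTail, List.cons.injEq, Prod.mk.injEq] at hrt
    obtain ⟨⟨_, hb⟩, hrs⟩ := hrt
    subst hb; subst hrs
    simp only [pvRenderTail, pvTailRender]
    split_ifs <;> first | (exfalso; omega) | simp
  | cons i r' ih =>
    intro prev lead b rs hp hl hrt
    have hpi : prev < i := by
      rcases List.pairwise_cons.mp hp with ⟨h1, _⟩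
      exact h1 i (by simp)
    have hp' : List.Pairwise (· < ·) (i :: r') := (List.pairwise_cons.mp hp).2
    by_cases hc : i = prev + 1
    · -- run continues
      have hrt' : pvRunsTail lead i r' = (lead, b) :: rs := by
        simpa [pvRunsTail, hc] using hrt
      have := ih i lead b rs hp' (by omega) hrt'
      obtain ⟨b', rs', hh, hbb⟩ := pv_headRuns r' lead i
      rw [hh] at hrt'
      obtain ⟨⟨_, hb'⟩, hrs'⟩ := by
        simpa [List.cons.injEq, Prod.mk.injEq] using hrt'
      have hlead_lt_b : lead < b := by omega
      simp only [pvRenderTail, if_neg (show ¬ (i - prev > 1) by omega)]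
      rw [this]
      by_cases hle : lead = prev
      · rw [if_pos (show i - lead = 1 by omega)]
        rw [if_neg (show ¬ lead = i by omega), if_pos hle,
            if_neg (show ¬ b = lead by omega)]
        simp [String.append_assoc]
      · rw [if_neg (show ¬ (i - lead = 1) by omega)]
        rw [if_neg (show ¬ lead = i by omega), if_neg hle]
        simp
    · -- gap: new run starts at i
      have hrt' : (lead, prev) :: pvRunsTail i i r' = (lead, b) :: rs := by
        simpa [pvRunsTail, hc] using hrt
      have hb : prev = b := by
        have := congrArg (fun l => (l.headD (0, 0)).2) hrt'
        simpa using this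
      have hrs : pvRunsTail i i r' = rs := by
        have := congrArg List.tail hrt'
        simpa using this
      subst hb
      obtain ⟨b2, rs2, hh2, hbb2⟩ := pv_headRuns r' i i
      have hR := ih i i b2 rs2 hp' (le_refl i) hh2
      simp only [pvRenderTail, if_pos (show i - prev > 1 by omega)]
      rw [hR, ← hrs, hh2]
      simp only [pvTailRender, pvFmt]
      split_ifs <;>
        first | (exfalso; omega) | simp [String.append_assoc]

theorem pv_lemB : ∀ (r : List Int) (a p : Int) (runs : List (Int × Int)),
    List.foldl pvBStep (runs ++ [(a, p)]) r = runs ++ pvRunsTail a p r := by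
  intro r
  induction r with
  | nil => intro a p runs; simp [pvRunsTail]
  | cons i r' ih =>
    intro a p runs
    by_cases h : i = p + 1
    · subst h
      have h1 : pvBStep (runs ++ [(a, p)]) (p + 1) = runs ++ [(a, p + 1)] := by
        simp [pvBStep]
      rw [List.foldl_cons, h1, ih]
      simp [pvRunsTail]
    · have h1 : pvBStep (runs ++ [(a, p)]) i = (runs ++ [(a, p)]) ++ [(i, i)] := by
        simp [pvBStep, h]
      rw [List.foldl_cons, h1, ih]
      simp [pvRunsTail, h]

theorem pv_getElem?_penult : ∀ (r : List Int) (x y : Int),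
    (x :: y :: r)[r.length]? = some (pvPenult x (y :: r)) := by
  intro r
  induction r with
  | nil => intro x y; simp [pvPenult]
  | cons z r' ih =>
    intro x y
    simp only [List.length_cons, List.getElem?_cons_succ, pvPenult]
    exact ih y z

theorem pv_pyGet_neg2 (r : List Int) (x y : Int) :
    PySem.List.pyGet? (x :: y :: r) (-2) = some (pvPenult x (y :: r)) := by
  have h := pv_getElem?_penult r x y
  simp [PySem.List.pyGet?, PySem.List.pyIdx?]
  obtain ⟨_, hh⟩ := List.getElem?_eq_some_iff.mp h
  exact hh

theorem pv_join_single (sep a : String) : PySem.Str.join sep [a] = a := by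
  simp [PySem.Str.join, PySem.Chars.join, List.intercalate]

theorem pv_join_cons_cons (sep a b : String) (l : List String) :
    PySem.Str.join sep (a :: b :: l) = a ++ sep ++ PySem.Str.join sep (b :: l) := by
  apply String.toList_inj.mp
  simp [PySem.Str.join, PySem.Chars.join, List.intercalate]

theorem pv_joinRuns : ∀ (rs : List (Int × Int)) (q : Int × Int),
    PySem.Str.join "," (List.map pvFmt (q :: rs)) = pvFmt q ++ pvTailRender rs := by
  intro rs
  induction rs with
  | nil => intro q; simp [pv_join_single, pvTailRender]
  | cons q2 rs' ih =>
    intro q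
    simp only [List.map_cons]
    rw [pv_join_cons_cons, ← List.map_cons, ih q2]
    simp [pvTailRender, String.append_assoc]

theorem pv_sorted_ne_nil (xs : List Int) (h : xs ≠ []) :
    PySem.List.sorted (PySem.Set.ofList xs) (fun x => x) false ≠ [] := by
  intro hnil
  rw [PySem.List.sorted_eq_nil_iff] at hnil
  cases xs with
  | nil => exact h rfl
  | cons a t =>
    have ha : a ∈ PySem.Set.ofList (a :: t) := (PySem.Set.mem_ofList _ _).mpr (by simp)
    rw [hnil] at ha
    simp at ha

-- ===== VERDICT (by name: the statement is the Claim_ definition above) =====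
theorem create_restraint_mask_py_spec : Claim_equal_create_restraint_mask_py := by
  unfold Claim_equal_create_restraint_mask_py
  intro xs _ hpre
  unfold Spec_create_restraint_mask_py create_restraint_mask_py create_restraint_mask_py_alt
  have hpw := PySem.List.sorted_ofList_pairwise_lt (xs := xs)
  have hne := pv_sorted_ne_nil xs hpre
  generalize hgen : PySem.List.sorted (PySem.Set.ofList xs) (fun x => x) false = s at hpw hne ⊢
  clear hgen hpre
  match s, hne with
  | [x], _ =>
    change "@" ++ PySem.Int.toStr (((PySem.List.pyGet? [x] 0).getD 0) + 1)
      = "@" ++ PySem.Str.join "," (List.map pvFmt (List.foldl pvBStep [(x, x)] []))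
    simp [PySem.List.pyGet?, PySem.List.pyIdx?, pvFmt, pv_join_single]
  | x :: y :: r, _ =>
    change pvFinishA (List.foldl pvAStep ("@" ++ PySem.Int.toStr (x + 1), x, x) (y :: r))
        ((PySem.List.pyGet? (x :: y :: r) (-2)).getD 0)
      = "@" ++ PySem.Str.join "," (List.map pvFmt (List.foldl pvBStep [(x, x)] (y :: r)))
    rw [pv_pyGet_neg2]
    simp only [Option.getD_some]
    rw [pv_lemA r y x x ("@" ++ PySem.Int.toStr (x + 1)) hpw (le_refl x)]
    have hB : List.foldl pvBStep [(x, x)] (y :: r) = pvRunsTail x x (y :: r) := by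
      simpa using pv_lemB (y :: r) x x []
    obtain ⟨b, rs, hruns, hxb⟩ := pv_headRuns (y :: r) x x
    rw [hB, hruns, pv_joinRuns,
        pv_lemR (y :: r) x x b rs hpw (le_refl x) hruns]
    simp only [pvFmt]
    by_cases hbx : b = x
    · simp [hbx, String.append_assoc]
    · rw [if_neg hbx, if_neg (show ¬ ((x, b).1 = (x, b).2) by simpa using fun h => hbx h.symm)]
      simp [String.append_assoc]
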